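-- pv_equiv track=rewrite | github.com/charlesdedampierre/BunkaTopics | bunka_topics/topics.py | wrap_by_word
-- ===== SOURCE A (Python) =====
-- def wrap_by_word(string, n_words):
--     """returns a string where \\n is inserted between every n words"""
--     try:
--         a = string.split()
--         ret = ""
--         for i in range(0, len(a), n_words):
--             ret += " ".join(a[i : i + n_words]) + "<br>"
--     except:
--         pass
--
--     return ret
-- ===== SOURCE B (Python) =====
-- def wrap_by_word(string, n_words):
--     """returns a string where a break is inserted between every n words"""
--     a = string.split()
--     ret = ""
--     if n_words > 0:
--         parts = []
--         for i, w in enumerate(a):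
--             parts.append(w)
--             parts.append("<br>" if (i + 1) % n_words == 0 or i + 1 == len(a) else " ")
--         ret = "".join(parts)
--     return ret
-- ===== Notes on version B (the rewrite author's own statement) =====
-- stated objective: alternative
-- what changed: Replaces the stride-range chunk-slicing loop ('<br>'-terminated join of a[i:i+n] per range step) by a single pass over enumerate(words) that keeps a running word counter and emits each word followed by '<br>' or ' ' chosen by (i+1) % n_words, joining once at the end; nonpositive n_words yields '' by an explicit guard instead of a caught exception/empty range.
import Mathlib
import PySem

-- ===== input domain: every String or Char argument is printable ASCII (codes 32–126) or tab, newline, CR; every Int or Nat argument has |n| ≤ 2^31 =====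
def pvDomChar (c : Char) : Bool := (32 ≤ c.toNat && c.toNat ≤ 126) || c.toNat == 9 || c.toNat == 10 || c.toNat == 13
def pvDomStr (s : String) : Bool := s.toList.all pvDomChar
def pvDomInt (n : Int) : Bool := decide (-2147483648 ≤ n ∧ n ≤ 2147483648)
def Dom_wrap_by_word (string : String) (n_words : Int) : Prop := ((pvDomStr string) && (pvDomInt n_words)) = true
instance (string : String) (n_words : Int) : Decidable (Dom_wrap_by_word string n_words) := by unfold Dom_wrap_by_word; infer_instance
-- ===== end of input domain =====

-- B replaces A's stride-range chunk-slicing loop by a single enumerate pass with a running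
-- word counter emitting '<br>' or ' ' after each word (objective: alternative, same cost).

-- ===== PORT A =====
-- literal port of A: a = string.split(); ret = ""; for i in range(0, len(a), n_words):
--   ret += " ".join(a[i:i+n_words]) + "<br>".  For n_words = 0 Python's range raises
-- ValueError, the bare except catches it, and ret is still "": hence the n_words = 0 branch.
def wrap_by_word (string : String) (n_words : Int) : String :=
  let a := PySem.Str.split₀ string
  let ret : String := ""
  if n_words = 0 then ret
  else
    (PySem.List.pyRange 0 (a.length : Int) n_words).foldl
      (fun ret i =>
        ret ++ PySem.Str.join " " (PySem.List.slice a (some i) (some (i + n_words))) ++ "<br>")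
      ret

-- ===== PORT B =====
-- literal port of B: split, then if n_words > 0 a single pass over enumerate(a) collecting
-- each word followed by '<br>' when (i+1) % n_words == 0 or i+1 == len(a), else ' '; ''.join.
def wrap_by_word_alt (string : String) (n_words : Int) : String :=
  let a := PySem.Str.split₀ string
  if 0 < n_words then
    let parts := (PySem.List.enumerate a).foldl
      (fun ps p =>
        ps ++ [p.2, if PySem.Int.mod (p.1 + 1) n_words = 0 ∨ p.1 + 1 = (a.length : Int)
                    then "<br>" else " "]) []
    PySem.Str.join "" parts
  else ""

-- ===== PRECONDITION & SPEC =====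
def Spec_wrap_by_word (string : String) (n_words : Int) (out : String) : Prop := out = wrap_by_word_alt string n_words
instance (string : String) (n_words : Int) (out : String) : Decidable (Spec_wrap_by_word string n_words out) := by unfold Spec_wrap_by_word; infer_instance

-- ===== CLAIM (what is proved, stated in full; the proofs are below) =====
def Claim_equal_wrap_by_word : Prop := ∀ (string : String) (n_words : Int), Dom_wrap_by_word string n_words → Spec_wrap_by_word string n_words (wrap_by_word string n_words)

-- ===== LEMMAS AND PROOFS =====

-- A's "<br>" as a character list
def pvBr : List Char := ['<', 'b', 'r', '>']

-- separator B emits after the word with absolute index i (as a character list)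
def pvSep (n L i : Int) : List Char :=
  if PySem.Int.mod (i + 1) n = 0 ∨ i + 1 = L then pvBr else [' ']

-- string-fold to list-level flatMap
theorem pv_toList_foldl (g : Int → String) (xs : List Int) (acc : String) :
    (xs.foldl (fun r i => r ++ g i) acc).toList
      = acc.toList ++ xs.flatMap (fun i => (g i).toList) := by
  induction xs generalizing acc with
  | nil => simp
  | cons x xs ih => simp [ih, List.append_assoc]

-- ''.join is flatten
theorem pv_join_nil (l : List (List Char)) : PySem.Chars.join [] l = l.flatten := by
  induction l with
  | nil => simp [PySem.Chars.join_nil]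
  | cons p rest ih =>
    cases rest with
    | nil => simp [PySem.Chars.join_singleton]
    | cons q r => simp [PySem.Chars.join_cons_cons, ih]

theorem pv_enumerate_append {α : Type} (xs ys : List α) (s : Int) :
    PySem.List.enumerate (xs ++ ys) s
      = PySem.List.enumerate xs s ++ PySem.List.enumerate ys (s + xs.length) := by
  induction xs generalizing s with
  | nil => simp [PySem.List.enumerate_nil]
  | cons x xs ih =>
    simp [PySem.List.enumerate_cons, ih]
    ring_nf

-- one chunk, word-interleaved = " ".join ++ "<br>"
theorem pv_chunk (c : List String) (sep : Int → List Char) (j : Int)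
    (hc : c ≠ [])
    (h1 : ∀ r : ℕ, r + 1 < c.length → sep (j + r) = [' '])
    (h2 : sep (j + c.length - 1) = pvBr) :
    (PySem.List.enumerate c j).flatMap (fun p => p.2.toList ++ sep p.1)
      = PySem.Chars.join [' '] (c.map String.toList) ++ pvBr := by
  induction c generalizing j with
  | nil => exact absurd rfl hc
  | cons w c ih =>
    cases c with
    | nil =>
      have h2' : sep j = pvBr := by simpa using h2
      simp [PySem.List.enumerate_cons, PySem.List.enumerate_nil,
        PySem.Chars.join_singleton, h2']
    | cons w' c' =>
      have hs0 : sep j = [' '] := by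
        have := h1 0 (by simp)
        simpa using this
      have ih' := ih (j + 1) (by simp)
        (by
          intro r hr
          have h := h1 (r + 1) (by simp at hr ⊢; omega)
          have he : j + 1 + (r : Int) = j + ((r + 1 : ℕ) : Int) := by push_cast; ring
          rw [he]; exact h)
        (by
          have he : j + 1 + ((w' :: c').length : Int) - 1
              = j + ((w :: w' :: c').length : Int) - 1 := by simp; ring
          rw [he]; exact h2)
      rw [PySem.List.enumerate_cons, List.flatMap_cons, ih', hs0]
      simp [PySem.Chars.join_cons_cons, List.append_assoc]

-- ceiling count of Python's range(0, len, m), as a Nat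
theorem pv_count (len m : ℕ) (hm : 0 < m) :
    (if (0:Int) < (len:Int) then ((((len:Int)) - 0 + m - 1) / m).toNat else 0)
      = (len + m - 1) / m := by
  by_cases h : 0 < len
  · rw [if_pos (show (0:Int) < (len:Int) by exact_mod_cast h)]
    have : ((len:Int)) - 0 + m - 1 = ((len + m - 1 : ℕ) : Int) := by omega
    rw [this]
    rfl
  · have hl : len = 0 := by omega
    subst hl
    exact (Nat.div_eq_of_lt (by omega)).symm

-- arithmetic of the if-branch of pvSep inside and at the end of a chunk
theorem pv_mod_small (m j r : Int) (hm : 0 < m) (hj : m ∣ j) (h0 : 0 < r) (hr : r < m) :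
    PySem.Int.mod (j + r) m = r := by
  rw [PySem.Int.mod_eq_emod_of_pos hm]
  obtain ⟨q, rfl⟩ := hj
  rw [show m * q + r = r + m * q by ring, Int.add_mul_emod_self_left]
  exact Int.emod_eq_of_lt (by omega) hr

theorem pv_mod_chunk_end (m j : Int) (hj : m ∣ j) :
    PySem.Int.mod (j + m) m = 0 :=
  (PySem.Int.mod_eq_zero_iff_dvd _ _).mpr (by exact Dvd.dvd.add hj ⟨1, by ring⟩)

theorem pv_flatMap_congr {α β : Type} (l : List α) (f g : α → List β)
    (h : ∀ x ∈ l, f x = g x) : l.flatMap f = l.flatMap g := by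
  induction l with
  | nil => rfl
  | cons x xs ih =>
    simp only [List.flatMap_cons, h x (by simp), ih (fun y hy => h y (by simp [hy]))]

-- the main bridge: A's chunk decomposition equals B's word-interleaved form
theorem pv_main (m : ℕ) (hm : 0 < m) (L : Int) :
    ∀ N (l : List String) (j : Int), l.length ≤ N → 0 ≤ j → (m : Int) ∣ j →
      j + l.length = L →
      (List.range ((l.length + m - 1) / m)).flatMap
          (fun k => PySem.Chars.join [' '] (((l.drop (m * k)).take m).map String.toList) ++ pvBr)
        = (PySem.List.enumerate l j).flatMap (fun p => p.2.toList ++ pvSep m L p.1) := by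
  intro N
  induction N with
  | zero =>
    intro l j hlen _ _ _
    have : l = [] := List.eq_nil_of_length_eq_zero (by omega)
    subst this
    simp only [List.length_nil, Nat.zero_add]
    rw [Nat.div_eq_of_lt (by omega)]
    simp [PySem.List.enumerate_nil]
  | succ N ih =>
    intro l j hlen hj hdvd hL
    by_cases hne : l = []
    · subst hne
      simp only [List.length_nil, Nat.zero_add]
      rw [Nat.div_eq_of_lt (by omega)]
      simp [PySem.List.enumerate_nil]
    · have hlpos : 0 < l.length := List.length_pos_of_ne_nil hne
      -- chunk head / rest split of the enumerate side
      set c := l.take m with hc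
      set rest := l.drop m with hrest
      have hsplit : l = c ++ rest := (List.take_append_drop m l).symm
      have hclen : c.length = min m l.length := by simp [hc]
      have hcpos : 0 < c.length := by omega
      have hrhs :
          (PySem.List.enumerate l j).flatMap (fun p => p.2.toList ++ pvSep m L p.1)
            = (PySem.List.enumerate c j).flatMap (fun p => p.2.toList ++ pvSep m L p.1)
              ++ (PySem.List.enumerate rest (j + c.length)).flatMap
                  (fun p => p.2.toList ++ pvSep m L p.1) := by
        conv_lhs => rw [hsplit]
        rw [pv_enumerate_append, List.flatMap_append]
      -- the chunk head collapses to " ".join ++ "<br>"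
      have hhead :
          (PySem.List.enumerate c j).flatMap (fun p => p.2.toList ++ pvSep m L p.1)
            = PySem.Chars.join [' '] (c.map String.toList) ++ pvBr := by
        apply pv_chunk c (pvSep m L) j (by intro h; rw [h] at hcpos; simp at hcpos)
        · intro r hr
          have hrm : (r : Int) + 1 < m := by omega
          have hne0 : PySem.Int.mod (j + r + 1) m = (r : Int) + 1 := by
            rw [show j + (r : Int) + 1 = j + ((r : Int) + 1) by ring]
            exact pv_mod_small _ _ _ (by exact_mod_cast hm) hdvd (by omega) hrm
          have hltL : j + (r : Int) + 1 ≠ L := by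
            have h' : r + 1 < l.length := by omega
            have h'' : (r : Int) + 1 < (l.length : Int) := by exact_mod_cast h'
            omega
          simp only [pvSep]
          rw [if_neg]
          rintro (hx | hx)
          · rw [hne0] at hx; omega
          · exact hltL hx
        · simp only [pvSep]
          rw [if_pos]
          by_cases hml : m ≤ l.length
          · left
            have hcm : c.length = m := by omega
            rw [hcm, show j + (m : Int) - 1 + 1 = j + m by ring]
            exact pv_mod_chunk_end _ _ hdvd
          · right
            have hcl : c.length = l.length := by omega
            rw [hcl]; omega
      -- the range side peels its first chunk
      obtain ⟨C, hC⟩ : ∃ C, (l.length + m - 1) / m = C + 1 := by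
        refine ⟨(l.length - 1) / m, ?_⟩
        have h1 : l.length + m - 1 = (l.length - 1) + m := by omega
        rw [h1, Nat.add_div_right _ hm]
      have hCrest : (rest.length + m - 1) / m = C := by
        have hrl : rest.length = l.length - m := by simp [hrest]
        by_cases hml : m ≤ l.length
        · have h1 : rest.length + m - 1 = l.length - 1 := by omega
          rw [h1]
          have h2 : (l.length + m - 1) / m = (l.length - 1) / m + 1 := by
            rw [show l.length + m - 1 = (l.length - 1) + m by omega, Nat.add_div_right _ hm]
          omega
        · have h0 : rest.length = 0 := by omega
          have h1 : (l.length + m - 1) / m = 1 := by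
            apply Nat.div_eq_of_lt_le <;> omega
          have h2 : (rest.length + m - 1) / m = 0 := by
            rw [h0]; exact Nat.div_eq_of_lt (by omega)
          omega
      rw [hC, List.range_succ_eq_map, List.flatMap_cons, List.flatMap_map]
      have hfirst : (l.drop (m * 0)).take m = c := by simp [hc]
      have htail :
          (List.range C).flatMap
              (fun k => PySem.Chars.join [' ']
                (((l.drop (m * (k + 1))).take m).map String.toList) ++ pvBr)
            = (List.range C).flatMap
              (fun k => PySem.Chars.join [' ']
                (((rest.drop (m * k)).take m).map String.toList) ++ pvBr) := by
        apply pv_flatMap_congr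
        intro k _
        have : l.drop (m * (k + 1)) = rest.drop (m * k) := by
          rw [hrest, List.drop_drop]
          congr 1
          ring
        rw [this]
      by_cases hml : m ≤ l.length
      · have hcm : c.length = m := by omega
        have hrec := ih rest (j + m) (by simp [hrest]; omega) (by omega)
          (by exact Dvd.dvd.add hdvd ⟨1, by ring⟩)
          (by simp [hrest]; omega)
        rw [hCrest] at hrec
        rw [hrhs, hhead, hfirst]
        simp only [Nat.succ_eq_add_one]
        rw [htail, hrec, hcm]
      · -- short last chunk: rest is empty and no chunks remain
        have hrest0 : rest = [] := by
          have : rest.length = 0 := by simp [hrest]; omega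
          exact List.eq_nil_of_length_eq_zero this
        have hC0 : C = 0 := by
          rw [hrest0] at hCrest
          simp [Nat.div_eq_of_lt (by omega : m - 1 < m)] at hCrest
          omega
        rw [hrhs, hhead, hfirst, hrest0, hC0]
        simp [PySem.List.enumerate_nil]

theorem pv_pyRange_neg_nil (a b s : Int) (hs : s < 0) (h : a ≤ b) :
    PySem.List.pyRange a b s = [] := by
  unfold PySem.List.pyRange
  rw [if_neg (by omega : ¬ s = 0)]
  simp [show ¬ 0 < s by omega, show ¬ b < a by omega]

theorem pv_flat2 (e : List (Int × String)) (f : Int × String → String) :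
    (List.map String.toList (e.flatMap (fun p => [p.2, f p]))).flatten
      = e.flatMap (fun p => p.2.toList ++ (f p).toList) := by
  induction e with
  | nil => rfl
  | cons p e ih => simp [ih]

-- ===== VERDICT (by name: the statement is the Claim_ definition above) =====
theorem wrap_by_word_spec : Claim_equal_wrap_by_word := by
  intro string n _
  unfold Spec_wrap_by_word
  simp only [wrap_by_word, wrap_by_word_alt]
  set a := PySem.Str.split₀ string with ha
  by_cases h0 : n = 0
  · subst h0
    norm_num
  · rw [if_neg h0]
    by_cases hpos : 0 < n
    · -- the real case: n = ↑m with m ≥ 1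
      rw [if_pos hpos]
      obtain ⟨m, rfl⟩ : ∃ m : ℕ, (m : Int) = n := ⟨n.toNat, Int.toNat_of_nonneg hpos.le⟩
      have hm : 0 < m := by exact_mod_cast hpos
      have hbr : ("<br>" : String).toList = pvBr := by decide
      have hsp : (" " : String).toList = [' '] := by decide
      have hemp : ("" : String).toList = ([] : List Char) := by decide
      apply String.toList_inj.mp
      have hA :
          ((PySem.List.pyRange 0 (a.length : Int) (m : Int)).foldl
              (fun ret i =>
                ret ++ PySem.Str.join " " (PySem.List.slice a (some i) (some (i + (m : Int)))) ++ "<br>")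
              "").toList
            = (PySem.List.enumerate a).flatMap
                (fun p => p.2.toList ++ pvSep (m : Int) (a.length : Int) p.1) := by
        rw [show (fun (ret : String) i =>
              ret ++ PySem.Str.join " " (PySem.List.slice a (some i) (some (i + (m : Int)))) ++ "<br>")
            = fun ret i =>
              ret ++ (PySem.Str.join " " (PySem.List.slice a (some i) (some (i + (m : Int)))) ++ "<br>")
          from by funext r i; rw [String.append_assoc]]
        rw [pv_toList_foldl, hemp, List.nil_append]
        rw [PySem.List.pyRange_of_pos 0 (a.length : Int) (by exact_mod_cast hm)]
        rw [pv_count a.length m hm]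
        rw [List.flatMap_map]
        rw [pv_flatMap_congr _ _
          (fun k => PySem.Chars.join [' '] (((a.drop (m * k)).take m).map String.toList) ++ pvBr)
          ?_]
        · exact pv_main m hm (a.length : Int) a.length a 0 le_rfl le_rfl (dvd_zero _) (by simp)
        · intro k _
          have h1 : (0 : Int) + (m : Int) * (k : Int) = ((m * k : ℕ) : Int) := by push_cast; ring
          have h2 : PySem.List.slice a (some ((0 : Int) + (m : Int) * (k : Int)))
                (some ((0 : Int) + (m : Int) * (k : Int) + (m : Int)))
              = (a.drop (m * k)).take m := by
            rw [h1, PySem.List.slice_natCast_add]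
          rw [h2]
          simp [PySem.Str.toList_join, hbr, hsp]
      have hB :
          (PySem.Str.join ""
              ((PySem.List.enumerate a).foldl
                (fun ps p =>
                  ps ++ [p.2, if PySem.Int.mod (p.1 + 1) (m : Int) = 0 ∨ p.1 + 1 = (a.length : Int)
                              then "<br>" else " "]) [])).toList
            = (PySem.List.enumerate a).flatMap
                (fun p => p.2.toList ++ pvSep (m : Int) (a.length : Int) p.1) := by
        rw [PySem.List.foldl_append_eq_flatMap, List.nil_append]
        rw [PySem.Str.toList_join, hemp, pv_join_nil, pv_flat2]
        apply pv_flatMap_congr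
        intro p _
        simp [pvSep, apply_ite String.toList, hbr, hsp]
      rw [hA, hB]
    · -- n < 0: range(0, len, n) is empty, B's guard gives ""
      rw [if_neg hpos]
      rw [pv_pyRange_neg_nil 0 (a.length : Int) n (by omega) (Int.natCast_nonneg _)]
      rfl
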